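-- pv_equiv track=rewrite | github.com/IQzhan/RepoSyncTool | sync_repo.py | MergeRepositoryConfigs
-- ===== SOURCE A (Python) =====
-- def MergeRepositoryConfigs(configs):
--     mergedConfigs = {}
--     for config in configs:
--         path = config['path']
--         key = path
--         if key in mergedConfigs:
--             versionGreater = mergedConfigs[key]['version'] - config['version']
--             if versionGreater <= 0:
--                 mergedConfigs[key] = config
--         else:
--             mergedConfigs[key] = config
--     return list(mergedConfigs.values())
-- ===== SOURCE B (Python) =====
-- def MergeRepositoryConfigs(configs):
--     groups = {}
--     for config in configs:
--         path = config['path']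
--         groups[path] = groups.get(path, []) + [config]
--     result = []
--     for lst in groups.values():
--         best = lst[0]
--         for cfg in lst[1:]:
--             if cfg['version'] >= best['version']:
--                 best = cfg
--         result.append(best)
--     return result
-- ===== Notes on version B (the rewrite author's own statement) =====
-- stated objective: alternative
-- what changed: A keeps a running best-config-per-path dict updated in place; B first groups all configs into a path->list dict and then reduces each group to the config with the highest version (last maximum wins), mapping over the groups in first-appearance order.
import Mathlib
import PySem

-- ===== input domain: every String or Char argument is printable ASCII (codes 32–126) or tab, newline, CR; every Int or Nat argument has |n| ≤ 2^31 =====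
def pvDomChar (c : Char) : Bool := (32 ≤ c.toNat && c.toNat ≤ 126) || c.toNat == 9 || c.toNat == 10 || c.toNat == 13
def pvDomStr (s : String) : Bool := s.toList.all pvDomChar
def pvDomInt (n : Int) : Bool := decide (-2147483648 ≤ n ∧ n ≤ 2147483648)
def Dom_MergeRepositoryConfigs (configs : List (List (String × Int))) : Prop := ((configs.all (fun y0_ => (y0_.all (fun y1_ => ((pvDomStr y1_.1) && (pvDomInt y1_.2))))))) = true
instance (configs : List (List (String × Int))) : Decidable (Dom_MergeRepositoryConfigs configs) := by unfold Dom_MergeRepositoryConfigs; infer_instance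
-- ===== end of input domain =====

-- B replaces A's running best-per-path dict by a group-by-path dict followed by a
-- per-group reduction keeping the last maximal version (objective: alternative decomposition).


-- config['path'] / config['version']: first-match lookup in the config's association list
-- (the Option default 0 is unreachable inside Pre_, where Python would raise KeyError instead)
def pvPath (c : List (String × Int)) : Int := ((PySem.Dict.mk c).get? "path").getD 0
def pvVer (c : List (String × Int)) : Int := ((PySem.Dict.mk c).get? "version").getD 0

-- ===== PORT A =====
def pvStepA (m : PySem.Dict Int (List (String × Int))) (config : List (String × Int)) :
    PySem.Dict Int (List (String × Int)) :=
  let key := pvPath config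
  match m.get? key with
  | some stored =>
      let versionGreater := pvVer stored - pvVer config
      if versionGreater ≤ 0 then m.insert key config else m
  | none => m.insert key config

def MergeRepositoryConfigs (configs : List (List (String × Int))) : List (List (String × Int)) :=
  (configs.foldl pvStepA PySem.Dict.empty).values

-- ===== PORT B =====
-- best of one group: scan keeping the config whose version is ≥ the current best (last max wins)
def pvBest (lst : List (List (String × Int))) : List (String × Int) :=
  match lst with
  | [] => []
  | c :: rest => rest.foldl (fun best cfg => if pvVer best ≤ pvVer cfg then cfg else best) c

def pvStepB (g : PySem.Dict Int (List (List (String × Int)))) (config : List (String × Int)) :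
    PySem.Dict Int (List (List (String × Int))) :=
  g.modify (pvPath config) [] (· ++ [config])

def MergeRepositoryConfigs_alt (configs : List (List (String × Int))) : List (List (String × Int)) :=
  ((configs.foldl pvStepB PySem.Dict.empty).values).map pvBest

-- ===== PRECONDITION & SPEC =====
-- Pre_ is exactly where Python A returns: every config has a 'path' key, and every config whose
-- path occurs in at least two configs also has a 'version' key (otherwise A raises KeyError).
def Pre_MergeRepositoryConfigs (configs : List (List (String × Int))) : Prop :=
  ∀ c ∈ configs, ((PySem.Dict.mk c).get? "path").isSome ∧
    (2 ≤ configs.countP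
        (fun c' => (PySem.Dict.mk c').get? "path" == (PySem.Dict.mk c).get? "path") →
      ((PySem.Dict.mk c).get? "version").isSome)
instance (configs : List (List (String × Int))) : Decidable (Pre_MergeRepositoryConfigs configs) := by
  unfold Pre_MergeRepositoryConfigs; infer_instance

def pvWitness_MergeRepositoryConfigs : (List (List (String × Int))) :=
  [[("path", 1), ("version", 2)], [("path", 1), ("version", 3)], [("path", 2), ("version", 0)]]

def Spec_MergeRepositoryConfigs (configs : List (List (String × Int))) (out : List (List (String × Int))) : Prop := out = MergeRepositoryConfigs_alt configs
instance (configs : List (List (String × Int))) (out : List (List (String × Int))) : Decidable (Spec_MergeRepositoryConfigs configs out) := by unfold Spec_MergeRepositoryConfigs; infer_instance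

-- ===== CLAIM (what is proved, stated in full; the proofs are below) =====
def Claim_equal_MergeRepositoryConfigs : Prop := ∀ (configs : List (List (String × Int))), Dom_MergeRepositoryConfigs configs → Pre_MergeRepositoryConfigs configs → Spec_MergeRepositoryConfigs configs (MergeRepositoryConfigs configs)

-- ===== LEMMAS AND PROOFS =====

-- B's group dict with every group collapsed to its best element: the value A's dict holds
def pvMapBest (g : PySem.Dict Int (List (List (String × Int)))) :
    PySem.Dict Int (List (String × Int)) :=
  PySem.Dict.mk (g.items.map (fun p => (p.1, pvBest p.2)))

theorem pv_get?_mapBest (g : PySem.Dict Int (List (List (String × Int)))) (k : Int) :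
    (pvMapBest g).get? k = (g.get? k).map pvBest := by
  obtain ⟨l⟩ := g
  induction l with
  | nil => rfl
  | cons p rest ih =>
    obtain ⟨a, v⟩ := p
    simp only [pvMapBest, List.map_cons] at *
    rw [PySem.Dict.get?_mk_cons, PySem.Dict.get?_mk_cons]
    by_cases h : (a == k) = true
    · simp [h]
    · simp only [h]; exact ih

theorem pv_keys_mapBest (g : PySem.Dict Int (List (List (String × Int)))) :
    (pvMapBest g).keys = g.keys := by
  simp [pvMapBest, PySem.Dict.keys]

theorem pv_contains_mapBest (g : PySem.Dict Int (List (List (String × Int)))) (k : Int) :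
    (pvMapBest g).contains k = g.contains k := by
  rw [PySem.Dict.contains_eq_isSome_get?, PySem.Dict.contains_eq_isSome_get?, pv_get?_mapBest]
  cases g.get? k <;> rfl

theorem pv_mapBest_insert (g : PySem.Dict Int (List (List (String × Int)))) (k : Int)
    (v : List (List (String × Int))) :
    pvMapBest (g.insert k v) = (pvMapBest g).insert k (pvBest v) := by
  apply PySem.Dict.ext
  show ((g.insert k v).items).map (fun p => (p.1, pvBest p.2)) = ((pvMapBest g).insert k (pvBest v)).items
  rw [PySem.Dict.items_insert, PySem.Dict.items_insert, pv_contains_mapBest]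
  by_cases h : g.contains k = true
  · simp only [h, if_true, List.map_map, pvMapBest]
    apply List.map_congr_left
    intro p _
    by_cases hp : (p.1 == k) = true <;> simp [hp, Function.comp]
  · simp [h, pvMapBest]

theorem pv_insert_self (d : PySem.Dict Int (List (String × Int))) (k : Int)
    (v : List (String × Int)) (hnd : d.keys.Nodup) (h : d.get? k = some v) :
    d.insert k v = d := by
  apply PySem.Dict.ext
  rw [PySem.Dict.items_insert]
  have hc : d.contains k = true := by
    rw [PySem.Dict.contains_eq_isSome_get?, h]; rfl
  simp only [hc, if_true]
  have hkv : (k, v) ∈ d.items := PySem.Dict.mem_items_of_get?_eq_some d h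
  conv_rhs => rw [← List.map_id d.items]
  apply List.map_congr_left
  intro p hp
  by_cases hpk : (p.1 == k) = true
  · simp only [hpk, if_true, id]
    -- with Nodup keys, p is the unique item at key k, hence p = (k, v)
    have hk : p.1 = k := by simpa using hpk
    have hp2 : (k, p.2) ∈ d.items := by rw [← hk]; simpa using hp
    have h2 : d.get? k = some p.2 := PySem.Dict.get?_of_mem_items d hp2 hnd
    rw [h] at h2
    have : p = (k, v) := by
      obtain ⟨p1, p2⟩ := p
      simp only at hk; cases hk
      simpa using h2.symm
    rw [this]
  · simp [hpk]

theorem pv_best_append (l : List (List (String × Int))) (c : List (String × Int)) (hl : l ≠ []) :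
    pvBest (l ++ [c]) = if pvVer (pvBest l) ≤ pvVer c then c else pvBest l := by
  obtain ⟨x, xs, rfl⟩ := List.exists_cons_of_ne_nil hl
  simp [pvBest, List.foldl_append]

theorem pv_step_comm (g : PySem.Dict Int (List (List (String × Int))))
    (c : List (String × Int)) (hnd : g.keys.Nodup) (hne : ∀ p ∈ g.items, p.2 ≠ []) :
    pvStepA (pvMapBest g) c = pvMapBest (pvStepB g c) := by
  unfold pvStepA pvStepB PySem.Dict.modify
  rw [pv_mapBest_insert]
  cases h : g.get? (pvPath c) with
  | none =>
    rw [PySem.Dict.getD_of_get?_eq_none _ _ h]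
    have hA : (pvMapBest g).get? (pvPath c) = none := by rw [pv_get?_mapBest, h]; rfl
    simp [hA, pvBest]
  | some l =>
    have hl : l ≠ [] := hne (pvPath c, l) (PySem.Dict.mem_items_of_get?_eq_some g h)
    rw [PySem.Dict.getD_of_get?_eq_some _ _ h]
    have hA : (pvMapBest g).get? (pvPath c) = some (pvBest l) := by rw [pv_get?_mapBest, h]; rfl
    simp only [hA, pv_best_append l c hl]
    by_cases hv : pvVer (pvBest l) - pvVer c ≤ 0
    · have : pvVer (pvBest l) ≤ pvVer c := by omega
      simp [hv, this]
    · have : ¬ pvVer (pvBest l) ≤ pvVer c := by omega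
      simp only [hv, if_false, this]
      rw [pv_insert_self _ _ _ (by rw [pv_keys_mapBest]; exact hnd) hA]

theorem pv_foldl_comm (configs : List (List (String × Int))) :
    ∀ (g : PySem.Dict Int (List (List (String × Int)))),
      g.keys.Nodup → (∀ p ∈ g.items, p.2 ≠ []) →
      configs.foldl pvStepA (pvMapBest g) = pvMapBest (configs.foldl pvStepB g) := by
  induction configs with
  | nil => intro g _ _; rfl
  | cons c cs ih =>
    intro g hnd hne
    have hnd' : (pvStepB g c).keys.Nodup := by
      unfold pvStepB PySem.Dict.modify
      exact PySem.Dict.nodup_keys_insert _ _ _ hnd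
    have hne' : ∀ p ∈ (pvStepB g c).items, p.2 ≠ [] := by
      intro p hp
      unfold pvStepB PySem.Dict.modify at hp
      rcases (PySem.Dict.mem_items_insert _ _ _ _).mp hp with h | ⟨h, _⟩
      · subst h; simp
      · exact hne p h
    simp only [List.foldl_cons, pv_step_comm g c hnd hne]
    exact ih _ hnd' hne'

-- ===== VERDICT (by name: the statement is the Claim_ definition above) =====
theorem MergeRepositoryConfigs_spec : Claim_equal_MergeRepositoryConfigs := by
  intro configs _ _
  unfold Spec_MergeRepositoryConfigs MergeRepositoryConfigs MergeRepositoryConfigs_alt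
  have h0 : (PySem.Dict.empty : PySem.Dict Int (List (String × Int))) = pvMapBest PySem.Dict.empty := rfl
  rw [h0, pv_foldl_comm configs PySem.Dict.empty (by simp [PySem.Dict.empty, PySem.Dict.keys])
    (by intro p hp; simp [PySem.Dict.empty] at hp)]
  simp [pvMapBest, PySem.Dict.values, List.map_map, Function.comp]
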